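-- pv_equiv track=rewrite | github.com/khopilot/ocr-training-km | eval/cer.py | levenshtein_ops
-- ===== SOURCE A (Python) =====
-- from typing import List, Tuple, Dict, Optional, Set
--
-- def levenshtein_ops(ref: str, hyp: str) -> Tuple[int, int, int]:
--     """
--     Get operation counts from Levenshtein alignment
--
--     Args:
--         ref: Reference string
--         hyp: Hypothesis string
--
--     Returns:
--         Tuple of (insertions, deletions, substitutions)
--     """
--     m, n = len(ref), len(hyp)
--     dp = [[0] * (n + 1) for _ in range(m + 1)]
--
--     for i in range(m + 1):
--         dp[i][0] = i
--     for j in range(n + 1):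
--         dp[0][j] = j
--
--     for i in range(1, m + 1):
--         for j in range(1, n + 1):
--             if ref[i-1] == hyp[j-1]:
--                 dp[i][j] = dp[i-1][j-1]
--             else:
--                 dp[i][j] = 1 + min(dp[i-1][j], dp[i][j-1], dp[i-1][j-1])
--
--     # Backtrack to count operations
--     i, j = m, n
--     insertions = deletions = substitutions = 0
--
--     while i > 0 or j > 0:
--         if i > 0 and j > 0 and ref[i-1] == hyp[j-1]:
--             i -= 1
--             j -= 1
--         elif i > 0 and j > 0 and dp[i][j] == dp[i-1][j-1] + 1:
--             substitutions += 1
--             i -= 1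
--             j -= 1
--         elif i > 0 and dp[i][j] == dp[i-1][j] + 1:
--             deletions += 1
--             i -= 1
--         else:
--             insertions += 1
--             j -= 1
--
--     return insertions, deletions, substitutions
-- ===== SOURCE B (Python) =====
-- def levenshtein_ops(ref, hyp):
--     """Forward DP: carry (insertions, deletions, substitutions) triples along with
--     distances, keeping only one row; no table, no backtrack."""
--     m, n = len(ref), len(hyp)
--     prev = [(j, (j, 0, 0)) for j in range(n + 1)]
--     for i in range(1, m + 1):
--         cur = [(i, (0, i, 0))]
--         for j in range(1, n + 1):
--             d_diag, t_diag = prev[j - 1]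
--             d_up, t_up = prev[j]
--             d_left, t_left = cur[j - 1]
--             if ref[i - 1] == hyp[j - 1]:
--                 cur.append((d_diag, t_diag))
--             else:
--                 best = min(d_up, d_left, d_diag)
--                 if d_diag == best:
--                     ins, dele, sub = t_diag
--                     cur.append((best + 1, (ins, dele, sub + 1)))
--                 elif d_up == best:
--                     ins, dele, sub = t_up
--                     cur.append((best + 1, (ins, dele + 1, sub)))
--                 else:
--                     ins, dele, sub = t_left
--                     cur.append((best + 1, (ins + 1, dele, sub)))
--         prev = cur
--     return prev[n][1]
-- ===== Notes on version B (the rewrite author's own statement) =====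
-- stated objective: alternative
-- what changed: Replaces the full dp table plus backtracking walk with a single forward pass that carries (ins, del, sub) triples alongside the distances, keeping only one DP row (O(n) space) and no backtrack loop.
import Mathlib
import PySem

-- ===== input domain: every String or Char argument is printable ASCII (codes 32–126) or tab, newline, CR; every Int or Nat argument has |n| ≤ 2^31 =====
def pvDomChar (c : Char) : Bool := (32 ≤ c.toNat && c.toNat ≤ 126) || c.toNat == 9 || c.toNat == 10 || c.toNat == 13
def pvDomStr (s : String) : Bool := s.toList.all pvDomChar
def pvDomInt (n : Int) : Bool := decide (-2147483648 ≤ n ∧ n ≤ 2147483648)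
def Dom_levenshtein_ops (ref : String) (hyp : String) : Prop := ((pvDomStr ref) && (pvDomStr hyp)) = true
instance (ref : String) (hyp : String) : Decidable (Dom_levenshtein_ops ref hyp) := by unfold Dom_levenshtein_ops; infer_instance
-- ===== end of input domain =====

-- B replaces A's full dp table + backtracking walk by a single forward pass that
-- carries (ins, del, sub) triples alongside the distances in one DP row
-- (alternative decomposition; the return values are proved equal on all inputs).

-- ===== PORT A =====
-- dp[i][j] read/write on the list-of-lists table (indices produced by A's loops are
-- always in range, exactly as in the Python).
def pvGet2 (dp : List (List Int)) (i j : Nat) : Int := (dp.getD i []).getD j 0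
def pvSet2 (dp : List (List Int)) (i j : Nat) (v : Int) : List (List Int) :=
  dp.set i ((dp.getD i []).set j v)

-- dp = [[0]*(n+1) for _ in range(m+1)]; then the two boundary-init loops
def pvDpInit (m n : Nat) : List (List Int) :=
  let dp := List.replicate (m+1) (List.replicate (n+1) (0:Int))
  let dp := (List.range (m+1)).foldl (fun dp i => pvSet2 dp i 0 (i:Int)) dp
  (List.range (n+1)).foldl (fun dp j => pvSet2 dp 0 j (j:Int)) dp

-- body of A's inner loop
def pvDpCell (r h : List Char) (dp : List (List Int)) (i j : Nat) : List (List Int) :=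
  if r.getD (i-1) ' ' = h.getD (j-1) ' ' then
    pvSet2 dp i j (pvGet2 dp (i-1) (j-1))
  else
    pvSet2 dp i j (1 + min (min (pvGet2 dp (i-1) j) (pvGet2 dp i (j-1))) (pvGet2 dp (i-1) (j-1)))

def pvDpTable (r h : List Char) : List (List Int) :=
  (List.range' 1 r.length).foldl
    (fun dp i => (List.range' 1 h.length).foldl (fun dp j => pvDpCell r h dp i j) dp)
    (pvDpInit r.length h.length)

-- A's backtracking while-loop; each iteration decreases i+j by exactly 1, so fuel
-- i+j reproduces the loop step for step (the fuel is only a termination device and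
-- is never exhausted on the tables A builds).
def pvBt (dp : List (List Int)) (r h : List Char) :
    Nat → Nat → Nat → Int × Int × Int → Int × Int × Int
  | 0, _, _, acc => acc
  | fuel+1, i, j, (ins, del, sub) =>
    if i = 0 ∧ j = 0 then (ins, del, sub)
    else if 0 < i ∧ 0 < j ∧ r.getD (i-1) ' ' = h.getD (j-1) ' ' then
      pvBt dp r h fuel (i-1) (j-1) (ins, del, sub)
    else if 0 < i ∧ 0 < j ∧ pvGet2 dp i j = pvGet2 dp (i-1) (j-1) + 1 then
      pvBt dp r h fuel (i-1) (j-1) (ins, del, sub+1)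
    else if 0 < i ∧ pvGet2 dp i j = pvGet2 dp (i-1) j + 1 then
      pvBt dp r h fuel (i-1) j (ins, del+1, sub)
    else
      pvBt dp r h fuel i (j-1) (ins+1, del, sub)

def levenshtein_ops (ref : String) (hyp : String) : Int × Int × Int :=
  let r := ref.toList
  let h := hyp.toList
  let dp := pvDpTable r h
  pvBt dp r h (r.length + h.length) r.length h.length (0, 0, 0)

-- ===== PORT B =====
-- body of B's inner loop: one cell = (distance, (ins, del, sub)); d = diagonal,
-- u = up, l = left neighbour (tuple unpacking ported as projections)
def pvCellB (r h : List Char) (i : Nat) (prev cur : List (Int × (Int × Int × Int)))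
    (j : Nat) : Int × (Int × Int × Int) :=
  let d := prev.getD (j-1) (0, (0, 0, 0))
  let u := prev.getD j (0, (0, 0, 0))
  let l := cur.getD (j-1) (0, (0, 0, 0))
  if r.getD (i-1) ' ' = h.getD (j-1) ' ' then (d.1, d.2)
  else
    let best := min (min u.1 l.1) d.1
    if d.1 = best then (best+1, (d.2.1, d.2.2.1, d.2.2.2+1))
    else if u.1 = best then (best+1, (u.2.1, u.2.2.1+1, u.2.2.2))
    else (best+1, (l.2.1+1, l.2.2.1, l.2.2.2))

def pvRowB (r h : List Char) (n i : Nat) (prev : List (Int × (Int × Int × Int))) :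
    List (Int × (Int × Int × Int)) :=
  (List.range' 1 n).foldl (fun cur j => cur ++ [pvCellB r h i prev cur j])
    [((i:Int), (0, (i:Int), 0))]

def levenshtein_ops_alt (ref : String) (hyp : String) : Int × Int × Int :=
  let r := ref.toList
  let h := hyp.toList
  let m := r.length
  let n := h.length
  let prev0 := (List.range (n+1)).map (fun j : Nat => ((j:Int), ((j:Int), 0, 0)))
  let last := (List.range' 1 m).foldl (fun prev i => pvRowB r h n i prev) prev0
  (last.getD n (0, (0, 0, 0))).2

-- ===== PRECONDITION & SPEC =====
def Spec_levenshtein_ops (ref : String) (hyp : String) (out : Int × Int × Int) : Prop := out = levenshtein_ops_alt ref hyp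
instance (ref : String) (hyp : String) (out : Int × Int × Int) : Decidable (Spec_levenshtein_ops ref hyp out) := by unfold Spec_levenshtein_ops; infer_instance

-- ===== CLAIM (what is proved, stated in full; the proofs are below) =====
def Claim_equal_levenshtein_ops : Prop := ∀ (ref : String) (hyp : String), Dom_levenshtein_ops ref hyp → Spec_levenshtein_ops ref hyp (levenshtein_ops ref hyp)

-- ===== LEMMAS AND PROOFS =====

-- mathematical Levenshtein distance of the prefixes, same recursion as the dp fill
def pvDist (r h : List Char) : Nat → Nat → Int
  | 0, j => (j : Int)
  | i+1, 0 => (i : Int) + 1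
  | i+1, j+1 =>
    if r.getD i ' ' = h.getD j ' ' then pvDist r h i j
    else 1 + min (min (pvDist r h i (j+1)) (pvDist r h (i+1) j)) (pvDist r h i j)
termination_by i j => i + j

-- the (ins, del, sub) triple at a cell, diag > up > left tie-break
def pvTrip (r h : List Char) : Nat → Nat → Int × Int × Int
  | 0, j => ((j : Int), 0, 0)
  | i+1, 0 => (0, (i : Int) + 1, 0)
  | i+1, j+1 =>
    if r.getD i ' ' = h.getD j ' ' then pvTrip r h i j
    else
      let du := pvDist r h i (j+1)
      let dl := pvDist r h (i+1) j
      let dd := pvDist r h i j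
      let best := min (min du dl) dd
      if dd = best then
        ((pvTrip r h i j).1, (pvTrip r h i j).2.1, (pvTrip r h i j).2.2 + 1)
      else if du = best then
        ((pvTrip r h i (j+1)).1, (pvTrip r h i (j+1)).2.1 + 1, (pvTrip r h i (j+1)).2.2)
      else
        ((pvTrip r h (i+1) j).1 + 1, (pvTrip r h (i+1) j).2.1, (pvTrip r h (i+1) j).2.2)
termination_by i j => i + j

def pvAdd (x y : Int × Int × Int) : Int × Int × Int :=
  (x.1 + y.1, x.2.1 + y.2.1, x.2.2 + y.2.2)

theorem pvDist_zero_right (r h : List Char) (i : Nat) : pvDist r h i 0 = (i : Int) := by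
  cases i <;> simp [pvDist]

theorem pvDist_zero_left (r h : List Char) (j : Nat) : pvDist r h 0 j = (j : Int) := by
  simp [pvDist]

theorem pvTrip_zero_right (r h : List Char) (i : Nat) : pvTrip r h i 0 = (0, (i : Int), 0) := by
  cases i <;> simp [pvTrip]

theorem pvTrip_zero_left (r h : List Char) (j : Nat) : pvTrip r h 0 j = ((j : Int), 0, 0) := by
  simp [pvTrip]

theorem pvDist_succ_succ (r h : List Char) (i j : Nat) :
    pvDist r h (i+1) (j+1) =
      if r.getD i ' ' = h.getD j ' ' then pvDist r h i j
      else 1 + min (min (pvDist r h i (j+1)) (pvDist r h (i+1) j)) (pvDist r h i j) := by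
  rw [pvDist]

theorem pvTrip_succ_succ (r h : List Char) (i j : Nat) :
    pvTrip r h (i+1) (j+1) =
      if r.getD i ' ' = h.getD j ' ' then pvTrip r h i j
      else
        if pvDist r h i j = min (min (pvDist r h i (j+1)) (pvDist r h (i+1) j)) (pvDist r h i j) then
          ((pvTrip r h i j).1, (pvTrip r h i j).2.1, (pvTrip r h i j).2.2 + 1)
        else if pvDist r h i (j+1) = min (min (pvDist r h i (j+1)) (pvDist r h (i+1) j)) (pvDist r h i j) then
          ((pvTrip r h i (j+1)).1, (pvTrip r h i (j+1)).2.1 + 1, (pvTrip r h i (j+1)).2.2)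
        else
          ((pvTrip r h (i+1) j).1 + 1, (pvTrip r h (i+1) j).2.1, (pvTrip r h (i+1) j).2.2) := by
  rw [pvTrip]

-- range helpers
theorem pvRange'_succ (k : Nat) : List.range' 1 (k+1) = List.range' 1 k ++ [k+1] := by
  rw [List.range'_concat]
  congr 1
  simp
  omega

-- getD / set basics (self-contained)
theorem pvGetD_set_eq {α : Type} : ∀ (l : List α) (i : Nat) (a d : α), i < l.length →
    (l.set i a).getD i d = a := by
  intro l
  induction l with
  | nil => intro i a d hlt; simp at hlt
  | cons x xs ih =>
    intro i a d hlt
    cases i with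
    | zero => simp [List.getD]
    | succ k => simpa [List.getD] using ih k a d (by simpa using hlt)

theorem pvGetD_set_ne {α : Type} : ∀ (l : List α) (i k : Nat) (a d : α), i ≠ k →
    (l.set i a).getD k d = l.getD k d := by
  intro l
  induction l with
  | nil => intro i k a d _; simp
  | cons x xs ih =>
    intro i k a d hne
    cases i with
    | zero =>
      cases k with
      | zero => exact absurd rfl hne
      | succ k => simp [List.getD]
    | succ i =>
      cases k with
      | zero => simp [List.getD]
      | succ k => simpa [List.getD] using ih i k a d (by omega)

theorem pvSet_of_le {α : Type} : ∀ (l : List α) (i : Nat) (a : α), l.length ≤ i →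
    l.set i a = l := by
  intro l
  induction l with
  | nil => intro i a _; simp
  | cons x xs ih =>
    intro i a hle
    cases i with
    | zero => simp at hle
    | succ i => simp [List.set, ih i a (by simpa using hle)]

theorem pvGetD_replicate {α : Type} : ∀ (n i : Nat) (a d : α),
    (List.replicate n a).getD i d = if i < n then a else d := by
  intro n
  induction n with
  | zero => intro i a d; simp
  | succ n ih =>
    intro i a d
    cases i with
    | zero => simp [List.getD]
    | succ i =>
      rw [List.replicate_succ]
      have hs : (a :: List.replicate n a).getD (i+1) d = (List.replicate n a).getD i d := by
        simp [List.getD]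
      rw [hs, ih i a d]
      simp only [Nat.add_lt_add_iff_right]

theorem pvGetD_map_range {α : Type} (f : Nat → α) (t k : Nat) (d : α) (hk : k < t) :
    ((List.range t).map f).getD k d = f k := by
  rw [List.getD_eq_getElem?_getD]
  simp [hk]

-- shape of the dp table
def pvShape (dp : List (List Int)) (m n : Nat) : Prop :=
  dp.length = m+1 ∧ ∀ i < m+1, (dp.getD i []).length = n+1

theorem pvShape_set2 {dp : List (List Int)} {m n : Nat} (i j : Nat) (hs : pvShape dp m n)
    (v : Int) : pvShape (pvSet2 dp i j v) m n := by
  obtain ⟨hl, hr⟩ := hs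
  constructor
  · simp [pvSet2, hl]
  · intro i' hi'
    by_cases hii : i = i'
    · subst hii
      by_cases hlen : i < dp.length
      · rw [pvSet2, pvGetD_set_eq _ _ _ _ hlen, List.length_set]
        exact hr i hi'
      · rw [pvSet2, pvSet_of_le _ _ _ (by omega)]
        exact hr i hi'
    · rw [pvSet2, pvGetD_set_ne _ _ _ _ _ hii]
      exact hr i' hi'

theorem pvGet2_set2_eq {dp : List (List Int)} {m n : Nat} {i j : Nat} (hs : pvShape dp m n)
    (hi : i ≤ m) (hj : j ≤ n) (v : Int) : pvGet2 (pvSet2 dp i j v) i j = v := by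
  obtain ⟨hl, hr⟩ := hs
  unfold pvGet2 pvSet2
  rw [pvGetD_set_eq _ _ _ _ (by omega)]
  exact pvGetD_set_eq _ _ _ _ (by rw [hr i (by omega)]; omega)

theorem pvGet2_set2_ne {dp : List (List Int)} {i j i' j' : Nat}
    (hne : i' ≠ i ∨ j' ≠ j) (v : Int) :
    pvGet2 (pvSet2 dp i j v) i' j' = pvGet2 dp i' j' := by
  unfold pvGet2 pvSet2
  by_cases hii : i' = i
  · subst hii
    have hjj : j' ≠ j := by tauto
    by_cases hlen : i' < dp.length
    · rw [pvGetD_set_eq _ _ _ _ hlen, pvGetD_set_ne _ _ _ _ _ (fun e => hjj e.symm)]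
    · rw [pvSet_of_le _ _ _ (by omega)]
  · rw [pvGetD_set_ne _ _ _ _ _ (fun e => hii e.symm)]

-- characterization of the initialized table
theorem pvInitCol (m n : Nat) : ∀ k, k ≤ m+1 →
    pvShape ((List.range k).foldl (fun dp i => pvSet2 dp i 0 (i:Int))
      (List.replicate (m+1) (List.replicate (n+1) (0:Int)))) m n ∧
    (∀ i j, i ≤ m → j ≤ n →
      pvGet2 ((List.range k).foldl (fun dp i => pvSet2 dp i 0 (i:Int))
        (List.replicate (m+1) (List.replicate (n+1) (0:Int)))) i j
        = if j = 0 ∧ i < k then (i:Int) else 0) := by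
  intro k
  induction k with
  | zero =>
    intro _
    simp only [List.range_zero, List.foldl_nil]
    constructor
    · constructor
      · simp
      · intro i hi
        rw [pvGetD_replicate, if_pos hi]
        simp
    · intro i j hi hj
      unfold pvGet2
      rw [pvGetD_replicate, if_pos (by omega), pvGetD_replicate, if_pos (by omega)]
      rw [if_neg (by omega)]
  | succ k ih =>
    intro hk
    obtain ⟨hsh, hget⟩ := ih (by omega)
    rw [show List.range (k+1) = List.range k ++ [k] from List.range_succ,
        List.foldl_append, List.foldl_cons, List.foldl_nil]
    refine ⟨pvShape_set2 _ _ hsh _, ?_⟩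
    intro i j hi hj
    by_cases hik : i = k ∧ j = 0
    · obtain ⟨rfl, rfl⟩ := hik
      rw [pvGet2_set2_eq hsh hi hj]
      rw [if_pos ⟨rfl, by omega⟩]
    · rw [pvGet2_set2_ne (by tauto) _, hget i j hi hj]
      split_ifs <;> first | rfl | omega

theorem pvDpInit_char (m n : Nat) : pvShape (pvDpInit m n) m n ∧
    (∀ i j, i ≤ m → j ≤ n → pvGet2 (pvDpInit m n) i j =
      if i = 0 then (j:Int) else if j = 0 then (i:Int) else 0) := by
  obtain ⟨hsh0, hget0⟩ := pvInitCol m n (m+1) le_rfl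
  have main : ∀ k, k ≤ n+1 →
      pvShape ((List.range k).foldl (fun dp j => pvSet2 dp 0 j (j:Int))
        ((List.range (m+1)).foldl (fun dp i => pvSet2 dp i 0 (i:Int))
          (List.replicate (m+1) (List.replicate (n+1) (0:Int))))) m n ∧
      (∀ i j, i ≤ m → j ≤ n →
        pvGet2 ((List.range k).foldl (fun dp j => pvSet2 dp 0 j (j:Int))
          ((List.range (m+1)).foldl (fun dp i => pvSet2 dp i 0 (i:Int))
            (List.replicate (m+1) (List.replicate (n+1) (0:Int))))) i j
          = if i = 0 ∧ j < k then (j:Int) else (if j = 0 then (i:Int) else 0)) := by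
    intro k
    induction k with
    | zero =>
      intro _
      simp only [List.range_zero, List.foldl_nil]
      refine ⟨hsh0, ?_⟩
      intro i j hi hj
      rw [hget0 i j hi hj]
      split_ifs <;> first | rfl | omega
    | succ k ih =>
      intro hk
      obtain ⟨hsh, hget⟩ := ih (by omega)
      rw [show List.range (k+1) = List.range k ++ [k] from List.range_succ,
          List.foldl_append, List.foldl_cons, List.foldl_nil]
      refine ⟨pvShape_set2 _ _ hsh _, ?_⟩
      intro i j hi hj
      by_cases hik : i = 0 ∧ j = k
      · obtain ⟨rfl, rfl⟩ := hik
        rw [pvGet2_set2_eq hsh hi hj]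
        rw [if_pos ⟨rfl, by omega⟩]
      · rw [pvGet2_set2_ne (by tauto) _, hget i j hi hj]
        split_ifs <;> first | rfl | omega
  have hdef : pvDpInit m n = (List.range (n+1)).foldl (fun dp j => pvSet2 dp 0 j (j:Int))
      ((List.range (m+1)).foldl (fun dp i => pvSet2 dp i 0 (i:Int))
        (List.replicate (m+1) (List.replicate (n+1) (0:Int)))) := rfl
  obtain ⟨hmn1, hmn2⟩ := main (n+1) le_rfl
  rw [hdef]
  refine ⟨hmn1, ?_⟩
  intro i j hi hj
  rw [hmn2 i j hi hj]
  split_ifs <;> first | rfl | omega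

-- row-fill invariant for A's main double loop
def pvCR (r h : List Char) (dp : List (List Int)) (i0 j0 : Nat) : Prop :=
  pvShape dp r.length h.length ∧
  (∀ i, i < i0 → ∀ j, j ≤ h.length → pvGet2 dp i j = pvDist r h i j) ∧
  (∀ j, j ≤ j0 → pvGet2 dp i0 j = pvDist r h i0 j) ∧
  (∀ i, i0 < i → i ≤ r.length → pvGet2 dp i 0 = (i:Int))

theorem pvCR_step (r h : List Char) (dp : List (List Int)) (i' j0 : Nat)
    (hi : i'+1 ≤ r.length) (hj0 : j0 < h.length) (hc : pvCR r h dp (i'+1) j0) :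
    pvCR r h (pvDpCell r h dp (i'+1) (j0+1)) (i'+1) (j0+1) := by
  obtain ⟨hs, h1, h2, h3⟩ := hc
  have hval : pvDpCell r h dp (i'+1) (j0+1)
      = pvSet2 dp (i'+1) (j0+1) (pvDist r h (i'+1) (j0+1)) := by
    unfold pvDpCell
    simp only [Nat.add_sub_cancel]
    rw [pvDist_succ_succ]
    split_ifs with hch
    · rw [h1 i' (by omega) j0 (by omega)]
    · rw [h1 i' (by omega) (j0+1) (by omega), h2 j0 le_rfl, h1 i' (by omega) j0 (by omega)]
  rw [hval]
  refine ⟨pvShape_set2 _ _ hs _, ?_, ?_, ?_⟩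
  · intro i hilt j hj
    rw [pvGet2_set2_ne (Or.inl (by omega)) _]
    exact h1 i hilt j hj
  · intro j hj
    by_cases hjj : j = j0+1
    · subst hjj
      exact pvGet2_set2_eq hs (by omega) (by omega) _
    · rw [pvGet2_set2_ne (Or.inr hjj) _]
      exact h2 j (by omega)
  · intro i hilt hile
    rw [pvGet2_set2_ne (Or.inl (by omega)) _]
    exact h3 i hilt hile

theorem pvCR_fold (r h : List Char) (i' : Nat) (hi : i'+1 ≤ r.length)
    (dp : List (List Int)) (hc : pvCR r h dp (i'+1) 0) :
    ∀ k, k ≤ h.length →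
      pvCR r h ((List.range' 1 k).foldl (fun dp j => pvDpCell r h dp (i'+1) j) dp) (i'+1) k := by
  intro k
  induction k with
  | zero => intro _; simpa using hc
  | succ k ih =>
    intro hk
    rw [pvRange'_succ, List.foldl_append, List.foldl_cons, List.foldl_nil]
    exact pvCR_step r h _ i' k hi (by omega) (ih (by omega))

-- whole-table invariant
def pvC (r h : List Char) (dp : List (List Int)) (i0 : Nat) : Prop :=
  pvShape dp r.length h.length ∧
  (∀ i, i ≤ i0 → ∀ j, j ≤ h.length → pvGet2 dp i j = pvDist r h i j) ∧
  (∀ i, i0 < i → i ≤ r.length → pvGet2 dp i 0 = (i:Int))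

theorem pvC_fold (r h : List Char) : ∀ k, k ≤ r.length →
    pvC r h ((List.range' 1 k).foldl
      (fun dp i => (List.range' 1 h.length).foldl (fun dp j => pvDpCell r h dp i j) dp)
      (pvDpInit r.length h.length)) k := by
  intro k
  induction k with
  | zero =>
    intro _
    simp only [List.range'_zero, List.foldl_nil]
    obtain ⟨hsh, hget⟩ := pvDpInit_char r.length h.length
    refine ⟨hsh, ?_, ?_⟩
    · intro i hile j hj
      have hz : i = 0 := by omega
      subst hz
      rw [hget 0 j (by omega) hj, pvDist_zero_left, if_pos rfl]
    · intro i hilt hile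
      rw [hget i 0 hile (by omega)]
      split_ifs <;> first | rfl | omega
  | succ k ih =>
    intro hk
    obtain ⟨hs, hA, hB⟩ := ih (by omega)
    rw [pvRange'_succ, List.foldl_append, List.foldl_cons, List.foldl_nil]
    have hcr0 : pvCR r h
        ((List.range' 1 k).foldl
          (fun dp i => (List.range' 1 h.length).foldl (fun dp j => pvDpCell r h dp i j) dp)
          (pvDpInit r.length h.length)) (k+1) 0 := by
      refine ⟨hs, ?_, ?_, ?_⟩
      · intro i hilt j hj
        exact hA i (by omega) j hj
      · intro j hj
        have hz : j = 0 := by omega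
        subst hz
        rw [hB (k+1) (by omega) (by omega), pvDist_zero_right]
      · intro i hilt hile
        exact hB i (by omega) hile
    obtain ⟨hs', h1', h2', h3'⟩ := pvCR_fold r h k (by omega) _ hcr0 h.length le_rfl
    refine ⟨hs', ?_, ?_⟩
    · intro i hile j hj
      rcases Nat.lt_or_ge i (k+1) with hlt | hge
      · exact h1' i hlt j hj
      · have hz : i = k+1 := by omega
        subst hz
        exact h2' j hj
    · exact h3'

theorem pvDpTable_get2 (r h : List Char) {i j : Nat}
    (hi : i ≤ r.length) (hj : j ≤ h.length) :
    pvGet2 (pvDpTable r h) i j = pvDist r h i j := by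
  have hc := pvC_fold r h r.length le_rfl
  exact hc.2.1 i hi j hj

-- the backtracking walk accumulates exactly the forward triple
theorem pvBt_eq (r h : List Char) (dp : List (List Int))
    (hdp : ∀ i, i ≤ r.length → ∀ j, j ≤ h.length → pvGet2 dp i j = pvDist r h i j) :
    ∀ fuel i j, i ≤ r.length → j ≤ h.length → i + j ≤ fuel → ∀ acc,
      pvBt dp r h fuel i j acc = pvAdd acc (pvTrip r h i j) := by
  intro fuel
  induction fuel with
  | zero =>
    intro i j hi hj hij acc
    obtain ⟨a, b, c⟩ := acc
    have hi0 : i = 0 := by omega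
    have hj0 : j = 0 := by omega
    subst hi0; subst hj0
    simp [pvBt, pvTrip, pvAdd]
  | succ fuel ih =>
    intro i j hi hj hij acc
    obtain ⟨a, b, c⟩ := acc
    match i, j with
    | 0, 0 => simp [pvBt, pvTrip, pvAdd]
    | 0, j'+1 =>
      rw [pvBt]
      simp only [Nat.add_sub_cancel]
      rw [if_neg (by omega), if_neg (by rintro ⟨hx, -⟩; omega),
          if_neg (by rintro ⟨hx, -⟩; omega), if_neg (by rintro ⟨hx, -⟩; omega)]
      rw [ih 0 j' (by omega) (by omega) (by omega)]
      rw [pvTrip_zero_left, pvTrip_zero_left]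
      simp [pvAdd, Prod.ext_iff] <;> omega
    | i'+1, 0 =>
      rw [pvBt]
      simp only [Nat.add_sub_cancel]
      rw [if_neg (by omega), if_neg (by rintro ⟨-, hx, -⟩; omega),
          if_neg (by rintro ⟨-, hx, -⟩; omega)]
      rw [if_pos ⟨by omega, by
        rw [hdp (i'+1) (by omega) 0 (by omega), hdp i' (by omega) 0 (by omega),
            pvDist_zero_right, pvDist_zero_right]
        omega⟩]
      rw [ih i' 0 (by omega) (by omega) (by omega)]
      rw [pvTrip_zero_right, pvTrip_zero_right]
      simp [pvAdd, Prod.ext_iff] <;> omega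
    | i'+1, j'+1 =>
      rw [pvBt]
      rw [if_neg (by omega)]
      simp only [Nat.add_sub_cancel]
      by_cases hch : r.getD i' ' ' = h.getD j' ' '
      · rw [if_pos ⟨by omega, by omega, hch⟩]
        rw [ih i' j' (by omega) (by omega) (by omega)]
        rw [pvTrip_succ_succ, if_pos hch]
      · rw [if_neg (by rintro ⟨-, -, hx⟩; exact hch hx)]
        have hDD := hdp i' (by omega) j' (by omega)
        have hDU := hdp i' (by omega) (j'+1) (by omega)
        have hIJ : pvGet2 dp (i'+1) (j'+1)
            = 1 + min (min (pvDist r h i' (j'+1)) (pvDist r h (i'+1) j')) (pvDist r h i' j') := by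
          rw [hdp (i'+1) (by omega) (j'+1) (by omega), pvDist_succ_succ, if_neg hch]
        rw [pvTrip_succ_succ, if_neg hch]
        by_cases hQd : pvDist r h i' j'
            = min (min (pvDist r h i' (j'+1)) (pvDist r h (i'+1) j')) (pvDist r h i' j')
        · rw [if_pos ⟨by omega, by omega, by rw [hIJ, hDD]; omega⟩]
          rw [ih i' j' (by omega) (by omega) (by omega)]
          rw [if_pos hQd]
          simp [pvAdd, Prod.ext_iff] <;> omega
        · rw [if_neg (by rintro ⟨-, -, hx⟩; rw [hIJ, hDD] at hx; exact hQd (by omega))]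
          by_cases hQu : pvDist r h i' (j'+1)
              = min (min (pvDist r h i' (j'+1)) (pvDist r h (i'+1) j')) (pvDist r h i' j')
          · rw [if_pos ⟨by omega, by rw [hIJ, hDU]; omega⟩]
            rw [ih i' (j'+1) (by omega) (by omega) (by omega)]
            rw [if_neg hQd, if_pos hQu]
            simp [pvAdd, Prod.ext_iff] <;> omega
          · rw [if_neg (by rintro ⟨-, hx⟩; rw [hIJ, hDU] at hx; exact hQu (by omega))]
            rw [ih (i'+1) j' (by omega) (by omega) (by omega)]
            rw [if_neg hQd, if_neg hQu]
            simp [pvAdd, Prod.ext_iff] <;> omega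

-- B's row recurrence computes (distance, triple) for the whole row
theorem pvRowB_partial (r h : List Char) (i' : Nat) (hi : i'+1 ≤ r.length) :
    ∀ k, k ≤ h.length →
      ((List.range' 1 k).foldl
        (fun cur j => cur ++ [pvCellB r h (i'+1)
          ((List.range (h.length+1)).map (fun j => (pvDist r h i' j, pvTrip r h i' j))) cur j])
        [(((i'+1 : Nat) : Int), (0, ((i'+1 : Nat) : Int), 0))])
      = (List.range (k+1)).map (fun j => (pvDist r h (i'+1) j, pvTrip r h (i'+1) j)) := by
  intro k
  induction k with
  | zero =>
    intro _
    simp [List.range_one, pvDist_zero_right, pvTrip_zero_right]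
  | succ k ih =>
    intro hk
    rw [pvRange'_succ, List.foldl_append, List.foldl_cons, List.foldl_nil, ih (by omega)]
    have hcell : pvCellB r h (i'+1)
        ((List.range (h.length+1)).map (fun j => (pvDist r h i' j, pvTrip r h i' j)))
        ((List.range (k+1)).map (fun j => (pvDist r h (i'+1) j, pvTrip r h (i'+1) j)))
        (k+1)
        = (pvDist r h (i'+1) (k+1), pvTrip r h (i'+1) (k+1)) := by
      unfold pvCellB
      simp only [Nat.add_sub_cancel]
      rw [pvGetD_map_range _ _ _ _ (by omega), pvGetD_map_range _ _ _ _ (by omega),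
          pvGetD_map_range _ _ _ _ (by omega)]
      rw [pvDist_succ_succ, pvTrip_succ_succ]
      split_ifs <;> simp [Prod.ext_iff] <;> omega
    rw [hcell]
    rw [show List.range (k+1+1) = List.range (k+1) ++ [k+1] from List.range_succ,
        List.map_append]
    simp

theorem pvRowB_spec (r h : List Char) (i' : Nat) (hi : i'+1 ≤ r.length) :
    pvRowB r h h.length (i'+1)
        ((List.range (h.length+1)).map (fun j => (pvDist r h i' j, pvTrip r h i' j)))
      = (List.range (h.length+1)).map (fun j => (pvDist r h (i'+1) j, pvTrip r h (i'+1) j)) := by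
  unfold pvRowB
  exact pvRowB_partial r h i' hi h.length le_rfl

theorem pvAlt_rows (r h : List Char) : ∀ k, k ≤ r.length →
    (List.range' 1 k).foldl (fun prev i => pvRowB r h h.length i prev)
      ((List.range (h.length+1)).map (fun j : Nat => ((j:Int), ((j:Int), 0, 0))))
    = (List.range (h.length+1)).map (fun j => (pvDist r h k j, pvTrip r h k j)) := by
  intro k
  induction k with
  | zero =>
    intro _
    simp only [List.range'_zero, List.foldl_nil]
    congr 1
    funext j
    rw [pvDist_zero_left, pvTrip_zero_left]
  | succ k ih =>
    intro hk
    rw [pvRange'_succ, List.foldl_append, List.foldl_cons, List.foldl_nil, ih (by omega)]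
    exact pvRowB_spec r h k (by omega)

theorem levenshtein_ops_alt_eq (ref hyp : String) :
    levenshtein_ops_alt ref hyp
      = pvTrip ref.toList hyp.toList ref.toList.length hyp.toList.length := by
  simp only [levenshtein_ops_alt]
  rw [pvAlt_rows ref.toList hyp.toList ref.toList.length le_rfl]
  rw [pvGetD_map_range _ _ _ _ (by omega)]

theorem levenshtein_ops_eq (ref hyp : String) :
    levenshtein_ops ref hyp
      = pvTrip ref.toList hyp.toList ref.toList.length hyp.toList.length := by
  simp only [levenshtein_ops]
  rw [pvBt_eq ref.toList hyp.toList (pvDpTable ref.toList hyp.toList)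
      (fun i hi j hj => pvDpTable_get2 ref.toList hyp.toList hi hj)
      (ref.toList.length + hyp.toList.length) ref.toList.length hyp.toList.length
      le_rfl le_rfl le_rfl]
  rcases hT : pvTrip ref.toList hyp.toList ref.toList.length hyp.toList.length with ⟨x, y, z⟩
  simp [pvAdd]

-- ===== VERDICT (by name: the statement is the Claim_ definition above) =====
theorem levenshtein_ops_spec : Claim_equal_levenshtein_ops := by
  intro ref hyp _
  unfold Spec_levenshtein_ops
  rw [levenshtein_ops_eq, levenshtein_ops_alt_eq]
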